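-- pv_equiv track=rewrite | github.com/xtof-durr/xtof-durr.github.io | ALG/dm/optimal_search_tree.py | cost_tree
-- ===== SOURCE A (Python) =====
-- def cost_tree(anc, freq):
-- 	n = len(anc)
-- 	desc = [[] for _ in range(n)]
-- 	root = None
-- 	for i in range(n):
-- 		if not( 0 <= anc[i] < n):
-- 			return -1
-- 		if anc[i] == i:
-- 			if root is None:
-- 				root = i
-- 			else:
-- 				return -2
-- 		else:
-- 			desc[anc[i]].append(i)
-- 	if root is None:
-- 		return -3
-- 	if max(map(len, desc)) > 2:
-- 		return -4
-- 	# explore bottom up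
-- 	level = [0] * n
-- 	level[root] = 0
-- 	Q = [root]
-- 	while Q:
-- 		v = Q.pop()
-- 		for u in desc[v]:
-- 			level[u] = level[v] + 1
-- 			Q.append(u)
-- 	return sum(freq[v] * level[v] for v in range(n))
-- ===== SOURCE B (Python) =====
-- def cost_tree(anc, freq):
--     n = len(anc)
--     count = [0] * n
--     root = None
--     for i in range(n):
--         a = anc[i]
--         if not (0 <= a < n):
--             return -1
--         if a == i:
--             if root is None:
--                 root = i
--             else:
--                 return -2
--         else:
--             count[a] += 1
--     if root is None:
--         return -3
--     if max(count) > 2: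
--         return -4
--     total = 0
--     for v in range(n):
--         u, d = v, 0
--         while u != root and d < n:
--             u = anc[u]
--             d += 1
--         if u == root:
--             total += freq[v] * d
--     return total
-- ===== Notes on version B (the rewrite author's own statement) =====
-- stated objective: alternative
-- what changed: B validates with per-node child counters instead of building child lists, and replaces A's explicit-stack top-down tree traversal (with a level array) by an independent bounded ancestor-chain walk from each node, summing freq[v]*depth(v) directly for nodes whose chain reaches the root.
import Mathlib
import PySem

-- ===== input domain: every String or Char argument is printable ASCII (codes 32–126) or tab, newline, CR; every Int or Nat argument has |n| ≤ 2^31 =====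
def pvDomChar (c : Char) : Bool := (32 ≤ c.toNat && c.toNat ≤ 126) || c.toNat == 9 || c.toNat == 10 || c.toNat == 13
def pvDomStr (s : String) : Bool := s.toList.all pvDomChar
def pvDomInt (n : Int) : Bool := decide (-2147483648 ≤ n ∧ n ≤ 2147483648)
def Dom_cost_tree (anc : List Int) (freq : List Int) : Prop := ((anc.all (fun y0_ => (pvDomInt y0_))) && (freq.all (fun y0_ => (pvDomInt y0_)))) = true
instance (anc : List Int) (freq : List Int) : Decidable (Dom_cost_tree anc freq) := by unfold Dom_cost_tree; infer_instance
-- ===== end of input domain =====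

-- B replaces A's explicit-stack top-down traversal (over per-node descendant lists) by
-- per-node ancestor-chain walks over child COUNTS only; equivalence of the RETURN value is proved.

-- ===== PORT A =====
-- validation loop of A: builds desc (lists of children) and finds the root; early returns become .error
def costTreeLoopA (anc : List Int) (n : Nat) (i : Nat) (desc : List (List Int)) (root : Option Nat) :
    Except Int (List (List Int) × Option Nat) :=
  if _h : i < n then
    let a := anc.getD i 0
    if ¬ (0 ≤ a ∧ a < (n : Int)) then .error (-1)
    else if a = (i : Int) then
      match root with
      | none => costTreeLoopA anc n (i + 1) desc (some i)
      | some _ => .error (-2)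
    else
      -- a.toNat is exact here: the branch guarantees 0 ≤ a
      costTreeLoopA anc n (i + 1) (desc.set a.toNat ((desc.getD a.toNat []) ++ [(i : Int)])) root
  else .ok (desc, root)
termination_by n - i

-- A's while-Q stack loop (Q.pop() = head of our list; children are pushed in order, so
-- they appear reversed on the stack); fuel n+1 bounds the number of pops (each node is
-- popped at most once), so the port computes exactly what the Python loop computes
def costTreeStack (desc : List (List Int)) : Nat → List Int → List Int → List Int
  | 0, _, level => level
  | _ + 1, [], level => level
  | fuel + 1, v :: Q, level =>
    let ds := desc.getD v.toNat []
    let level' := ds.foldl (fun lv u => lv.set u.toNat (lv.getD v.toNat 0 + 1)) level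
    costTreeStack desc fuel (ds.reverse ++ Q) level'

def cost_tree (anc : List Int) (freq : List Int) : Int :=
  let n := anc.length
  match costTreeLoopA anc n 0 (List.replicate n []) none with
  | .error e => e
  | .ok (desc, root) =>
    match root with
    | none => -3
    | some r =>
      if 2 < ((desc.map (fun l => (l.length : Int))).max?.getD 0) then -4
      else
        let level := costTreeStack desc (n + 1) [(r : Int)] ((List.replicate n (0 : Int)).set r 0)
        ((List.range n).map (fun v => freq.getD v 0 * level.getD v 0)).sum

-- ===== PORT B =====
-- B's validation loop: identical checks, but keeps only child counts, no child lists
def costTreeLoopB (anc : List Int) (n : Nat) (i : Nat) (count : List Int) (root : Option Nat) :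
    Except Int (List Int × Option Nat) :=
  if _h : i < n then
    let a := anc.getD i 0
    if ¬ (0 ≤ a ∧ a < (n : Int)) then .error (-1)
    else if a = (i : Int) then
      match root with
      | none => costTreeLoopB anc n (i + 1) count (some i)
      | some _ => .error (-2)
    else
      costTreeLoopB anc n (i + 1) (count.set a.toNat ((count.getD a.toNat 0) + 1)) root
  else .ok (count, root)
termination_by n - i

-- B's inner while loop: walk the ancestor chain from u, at most n steps, stop at root
def costTreeChain (anc : List Int) (r : Int) (n : Nat) (u : Int) (d : Nat) : Int × Nat :=
  if u ≠ r ∧ d < n then costTreeChain anc r n (anc.getD u.toNat 0) (d + 1) else (u, d)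
termination_by n - d

def cost_tree_alt (anc : List Int) (freq : List Int) : Int :=
  let n := anc.length
  match costTreeLoopB anc n 0 (List.replicate n 0) none with
  | .error e => e
  | .ok (count, root) =>
    match root with
    | none => -3
    | some r =>
      if 2 < (count.max?.getD 0) then -4
      else
        (List.range n).foldl (fun (total : Int) (v : Nat) =>
          let p := costTreeChain anc (r : Int) n (v : Int) 0
          if p.1 = (r : Int) then total + freq.getD v 0 * (p.2 : Int) else total) 0

-- ===== PRECONDITION & SPEC =====
-- Pre_ excludes exactly the inputs on which Python A raises IndexError: a fully valid
-- parent array (all in range, a root, child counts ≤ 2) together with freq shorter than anc;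
-- on every other input A returns normally.
def Pre_cost_tree (anc : List Int) (freq : List Int) : Prop :=
  anc.length ≤ freq.length ∨
  ¬ ((∀ i < anc.length, 0 ≤ anc.getD i 0 ∧ anc.getD i 0 < (anc.length : Int)) ∧
     ((List.range anc.length).countP (fun i => decide (anc.getD i 0 = (i : Int)))) = 1 ∧
     (∀ a < anc.length,
       ((List.range anc.length).countP
         (fun i => decide (anc.getD i 0 = (a : Int) ∧ i ≠ a))) ≤ 2))

instance (anc : List Int) (freq : List Int) : Decidable (Pre_cost_tree anc freq) := by
  unfold Pre_cost_tree; infer_instance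

def pvWitness_cost_tree : List Int × List Int := ([0, 0, 1], [1, 2, 3])

def Spec_cost_tree (anc : List Int) (freq : List Int) (out : Int) : Prop := out = cost_tree_alt anc freq
instance (anc : List Int) (freq : List Int) (out : Int) : Decidable (Spec_cost_tree anc freq out) := by unfold Spec_cost_tree; infer_instance

-- ===== CLAIM (what is proved, stated in full; the proofs are below) =====
def Claim_equal_cost_tree : Prop := ∀ (anc : List Int) (freq : List Int), Dom_cost_tree anc freq → Pre_cost_tree anc freq → Spec_cost_tree anc freq (cost_tree anc freq)

-- ===== LEMMAS AND PROOFS =====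

-- parent function induced by the validated parent array
def pvPar (anc : List Int) (v : Nat) : Nat := (anc.getD v 0).toNat

-- number of steps from v to the root along parents, within the given fuel (none = not reached)
def pvSteps (par : Nat → Nat) (r : Nat) : Nat → Nat → Option Nat
  | 0, v => if v = r then some 0 else none
  | f + 1, v => if v = r then some 0 else (pvSteps par r f (par v)).map (· + 1)

-- "v is a strict ancestor of u" (both reachable), decided through depths
def pvSB (par : Nat → Nat) (r n : Nat) (v u : Nat) : Bool :=
  match pvSteps par r n u, pvSteps par r n v with
  | some du, some dv => decide (dv < du) && decide (par^[du - dv] u = v)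
  | _, _ => false

-- the children of v recorded by A's validation loop after processing indices < m
def pvChildren (anc : List Int) (m v : Nat) : List Nat :=
  (List.range m).filter (fun j => decide (anc.getD j 0 = (v : Int)) && decide (anc.getD j 0 ≠ (j : Int)))

def pvRootInv (anc : List Int) (i : Nat) (root : Option Nat) : Prop :=
  match root with
  | none => ∀ j < i, anc.getD j 0 ≠ (j : Int)
  | some r => r < i ∧ anc.getD r 0 = (r : Int)

theorem pvSteps_char (par : Nat → Nat) (r : Nat) :
    ∀ (f v d : Nat), pvSteps par r f v = some d ↔
      (d ≤ f ∧ par^[d] v = r ∧ ∀ k < d, par^[k] v ≠ r) := by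
  intro f
  induction f with
  | zero =>
    intro v d
    simp only [pvSteps]
    constructor
    · intro h
      split at h
      · rename_i hv
        cases h
        exact ⟨Nat.le_refl 0, by simpa using hv, by omega⟩
      · cases h
    · rintro ⟨hd, hit, _⟩
      interval_cases d
      simp only [Function.iterate_zero, id_eq] at hit
      simp [hit]
  | succ f ih =>
    intro v d
    simp only [pvSteps]
    split
    · rename_i hv
      subst hv
      constructor
      · intro h; cases h
        exact ⟨Nat.zero_le _, by simp, by omega⟩
      · rintro ⟨_, _, hmin⟩
        rcases Nat.eq_zero_or_pos d with h0 | h0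
        · simp [h0]
        · exact absurd (by simp) (hmin 0 h0)
    · rename_i hv
      constructor
      · intro h
        rcases Option.map_eq_some_iff.mp h with ⟨d', hd', rfl⟩
        rcases (ih (par v) d').mp hd' with ⟨h1, h2, h3⟩
        refine ⟨by omega, ?_, ?_⟩
        · rw [Function.iterate_succ_apply]; exact h2
        · intro k hk
          cases k with
          | zero => simpa using hv
          | succ k => rw [Function.iterate_succ_apply]; exact h3 k (by omega)
      · rintro ⟨hd, hit, hmin⟩
        cases d with
        | zero => simp only [Function.iterate_zero, id_eq] at hit; exact absurd hit hv
        | succ d =>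
          have : pvSteps par r f (par v) = some d := by
            refine (ih (par v) d).mpr ⟨by omega, ?_, ?_⟩
            · rw [← Function.iterate_succ_apply]; exact hit
            · intro k hk
              have := hmin (k + 1) (by omega)
              rwa [Function.iterate_succ_apply] at this
          simp [this]

theorem pvSteps_none (par : Nat → Nat) (r : Nat) :
    ∀ (f v : Nat), pvSteps par r f v = none ↔ ∀ k ≤ f, par^[k] v ≠ r := by
  intro f
  induction f with
  | zero =>
    intro v
    simp only [pvSteps]
    constructor
    · intro h
      split at h
      · cases h
      · rename_i hv
        intro k hk
        interval_cases k
        simpa using hv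
    · intro h
      have := h 0 (Nat.le_refl 0)
      simp only [Function.iterate_zero, id_eq] at this
      simp [this]
  | succ f ih =>
    intro v
    simp only [pvSteps]
    split
    · rename_i hv
      subst hv
      constructor
      · intro h; cases h
      · intro h; exact absurd (by simp) (h 0 (Nat.zero_le _))
    · rename_i hv
      rw [Option.map_eq_none_iff, ih (par v)]
      constructor
      · intro h k hk
        cases k with
        | zero => simpa using hv
        | succ k => rw [Function.iterate_succ_apply]; exact h k (by omega)
      · intro h k hk
        have := h (k + 1) (by omega)
        rwa [Function.iterate_succ_apply] at this

theorem pvSteps_self (par : Nat → Nat) (r f : Nat) : pvSteps par r f r = some 0 := by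
  cases f <;> simp [pvSteps]

theorem pvIter_mem (par : Nat → Nat) (n : Nat) (hcl : ∀ v < n, par v < n) :
    ∀ (k v : Nat), v < n → par^[k] v < n := by
  intro k
  induction k with
  | zero => intro v hv; simpa using hv
  | succ k ih =>
    intro v hv
    rw [Function.iterate_succ_apply]
    exact ih (par v) (hcl v hv)

theorem pvSteps_lt (par : Nat → Nat) (r n : Nat) (hcl : ∀ v < n, par v < n)
    {v d : Nat} (hv : v < n) (h : pvSteps par r n v = some d) : d < n := by
  rcases (pvSteps_char par r n v d).mp h with ⟨h1, h2, h3⟩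
  have hinj : ∀ k1 k2, k1 < k2 → k2 ≤ d → par^[k1] v ≠ par^[k2] v := by
    intro k1 k2 hlt hle heq
    have : par^[d - (k2 - k1)] v = r := by
      have e1 : d - (k2 - k1) = (d - k2) + k1 := by omega
      rw [e1, Function.iterate_add_apply, heq, ← Function.iterate_add_apply]
      have e2 : d - k2 + k2 = d := by omega
      rw [e2]; exact h2
    exact h3 (d - (k2 - k1)) (by omega) this
  by_contra hdn
  simp only [not_lt] at hdn
  have hcard : (Finset.range (d + 1)).card ≤ (Finset.range n).card := by
    apply Finset.card_le_card_of_injOn (fun k => par^[k] v)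
    · intro k _
      exact Finset.mem_range.mpr (pvIter_mem par n hcl k v hv)
    · intro k1 hk1 k2 hk2 heq
      simp only [Finset.mem_coe, Finset.mem_range] at hk1 hk2
      by_contra hne
      rcases Nat.lt_or_ge k1 k2 with hlt | hge
      · exact hinj k1 k2 hlt (by omega) heq
      · exact hinj k2 k1 (by omega) (by omega) heq.symm
  simp only [Finset.card_range] at hcard
  omega

theorem pvSteps_shift (par : Nat → Nat) (r n : Nat) (hfix : par r = r)
    {v dv : Nat} (h : pvSteps par r n v = some dv) (k : Nat) :
    pvSteps par r n (par^[k] v) = some (dv - k) := by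
  rcases (pvSteps_char par r n v dv).mp h with ⟨h1, h2, h3⟩
  rcases Nat.le_total k dv with hk | hk
  · refine (pvSteps_char par r n _ _).mpr ⟨by omega, ?_, ?_⟩
    · rw [← Function.iterate_add_apply]
      have : dv - k + k = dv := by omega
      rw [this]; exact h2
    · intro j hj hjr
      rw [← Function.iterate_add_apply] at hjr
      exact h3 (j + k) (by omega) hjr
  · have : par^[k] v = r := by
      have e : k = (k - dv) + dv := by omega
      rw [e, Function.iterate_add_apply, h2]
      exact Function.iterate_fixed hfix _
    rw [this]
    have : dv - k = 0 := by omega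
    rw [this]
    exact pvSteps_self par r n

theorem pvSteps_child (par : Nat → Nat) (r n : Nat) (hcl : ∀ v < n, par v < n)
    (hfix : par r = r) {u v d : Nat} (hu : u < n) (hpu : par u = v) (hne : u ≠ v)
    (h : pvSteps par r n v = some d) : pvSteps par r n u = some (d + 1) := by
  rcases (pvSteps_char par r n v d).mp h with ⟨h1, h2, h3⟩
  have hvn : v < n := hpu ▸ hcl u hu
  have hd : d < n := pvSteps_lt par r n hcl hvn h
  refine (pvSteps_char par r n u (d + 1)).mpr ⟨by omega, ?_, ?_⟩
  · rw [Function.iterate_succ_apply, hpu]; exact h2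
  · intro k hk
    cases k with
    | zero =>
      simp only [Function.iterate_zero, id_eq]
      intro hur
      subst hur
      exact hne (by rw [← hpu, hfix])
    | succ k =>
      rw [Function.iterate_succ_apply, hpu]
      exact h3 k (by omega)

theorem pvSB_child (par : Nat → Nat) (r n : Nat) (hcl : ∀ v < n, par v < n)
    (hfix : par r = r) {u v : Nat} (hu : u < n) (hpu : par u = v) (hne : u ≠ v)
    (h : (pvSteps par r n v).isSome) : pvSB par r n v u = true := by
  rcases Option.isSome_iff_exists.mp h with ⟨d, hd⟩
  have hu' := pvSteps_child par r n hcl hfix hu hpu hne hd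
  simp only [pvSB, hu', hd]
  have : d + 1 - d = 1 := by omega
  rw [this]
  simp [hpu]

theorem pvSB_irrefl (par : Nat → Nat) (r n : Nat) (v : Nat) : pvSB par r n v v = false := by
  simp only [pvSB]
  cases h : pvSteps par r n v <;> simp

theorem pvSB_trans (par : Nat → Nat) (r n : Nat) {v w u : Nat}
    (h1 : pvSB par r n v w = true) (h2 : pvSB par r n w u = true) : pvSB par r n v u = true := by
  simp only [pvSB] at h1 h2 ⊢
  cases hw : pvSteps par r n w with
  | none => rw [hw] at h1; cases h1
  | some dw =>
    cases hv : pvSteps par r n v with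
    | none => rw [hw, hv] at h1; cases h1
    | some dv =>
      cases hu : pvSteps par r n u with
      | none => rw [hu] at h2; cases h2
      | some du =>
        rw [hw, hv] at h1
        rw [hu, hw] at h2
        simp only [Bool.and_eq_true, decide_eq_true_eq] at h1 h2
        obtain ⟨hlt1, he1⟩ := h1
        obtain ⟨hlt2, he2⟩ := h2
        simp only [Bool.and_eq_true, decide_eq_true_eq]
        refine ⟨by omega, ?_⟩
        have e : du - dv = (dw - dv) + (du - dw) := by omega
        rw [e, Function.iterate_add_apply, he2, he1]

theorem pvSB_compare (par : Nat → Nat) (r n : Nat) {v w u : Nat}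
    (h1 : pvSB par r n v u = true) (h2 : pvSB par r n w u = true) :
    v = w ∨ pvSB par r n v w = true ∨ pvSB par r n w v = true := by
  simp only [pvSB] at h1 h2 ⊢
  cases hu : pvSteps par r n u with
  | none => rw [hu] at h1; cases h1
  | some du =>
    cases hv : pvSteps par r n v with
    | none => rw [hu, hv] at h1; cases h1
    | some dv =>
      cases hw : pvSteps par r n w with
      | none => rw [hu, hw] at h2; cases h2
      | some dw =>
        rw [hu, hv] at h1
        rw [hu, hw] at h2
        simp only [Bool.and_eq_true, decide_eq_true_eq] at h1 h2
        obtain ⟨hlt1, he1⟩ := h1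
        obtain ⟨hlt2, he2⟩ := h2
        rcases Nat.lt_trichotomy dv dw with hc | hc | hc
        · right; left
          simp only [Bool.and_eq_true, decide_eq_true_eq]
          refine ⟨hc, ?_⟩
          have e : dw - dv = (du - dv) - (du - dw) := by omega
          have e2 : du - dv = (dw - dv) + (du - dw) := by omega
          rw [← he2, ← Function.iterate_add_apply, ← e2, he1]
        · left
          rw [← he1, ← he2, hc]
        · right; right
          simp only [Bool.and_eq_true, decide_eq_true_eq]
          refine ⟨hc, ?_⟩
          have e2 : du - dw = (dv - dw) + (du - dv) := by omega
          rw [← he1, ← Function.iterate_add_apply, ← e2, he2]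

theorem pvSB_decompose (par : Nat → Nat) (r n : Nat) (hcl : ∀ v < n, par v < n)
    (hfix : par r = r) {v u : Nat} (hu : u < n) (h : pvSB par r n v u = true) :
    ∃ c, c < n ∧ par c = v ∧ c ≠ v ∧ (c = u ∨ pvSB par r n c u = true) := by
  simp only [pvSB] at h
  cases hu2 : pvSteps par r n u with
  | none => rw [hu2] at h; cases h
  | some du =>
    cases hv : pvSteps par r n v with
    | none => rw [hu2, hv] at h; cases h
    | some dv =>
      rw [hu2, hv] at h
      simp only [Bool.and_eq_true, decide_eq_true_eq] at h
      obtain ⟨hlt, he⟩ := h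
      refine ⟨par^[du - dv - 1] u, pvIter_mem par n hcl _ u hu, ?_, ?_, ?_⟩
      · have e : du - dv - 1 + 1 = du - dv := by omega
        have h2 : par^[du - dv - 1 + 1] u = v := by rw [e]; exact he
        rw [Function.iterate_succ_apply'] at h2
        exact h2
      · have hc := pvSteps_shift par r n hfix hu2 (du - dv - 1)
        intro hcv
        rw [hcv, hv] at hc
        have e : du - (du - dv - 1) = dv + 1 := by omega
        rw [e] at hc
        simp at hc
      · rcases Nat.eq_zero_or_pos (du - dv - 1) with h0 | h0
        · left; rw [h0]; simp
        · right
          have hc := pvSteps_shift par r n hfix hu2 (du - dv - 1)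
          have e : du - (du - dv - 1) = dv + 1 := by omega
          rw [e] at hc
          simp only [pvSB, hu2, hc, Bool.and_eq_true, decide_eq_true_eq]
          refine ⟨by omega, ?_⟩
          have e2 : du - (dv + 1) = du - dv - 1 := by omega
          rw [e2]

theorem pvGetD_set {α : Type} (l : List α) (m : Nat) (x d : α) (j : Nat) :
    (l.set m x).getD j d = if m = j ∧ m < l.length then x else l.getD j d := by
  by_cases h1 : m = j
  · subst h1
    by_cases h2 : m < l.length
    · simp [List.getD_eq_getElem?_getD, List.getElem?_set, h2]
    · have hnone1 : (l.set m x)[m]? = none := List.getElem?_eq_none_iff.mpr (by simp; omega)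
      have hnone2 : l[m]? = none := List.getElem?_eq_none_iff.mpr (by omega)
      simp [List.getD_eq_getElem?_getD, hnone1, hnone2, h2]
  · simp [List.getD_eq_getElem?_getD, List.getElem?_set, h1]

theorem pvGetD_map_len (desc : List (List Int)) (a : Nat) :
    (desc.map (fun l => ((l.length : Nat) : Int))).getD a 0 = ((desc.getD a []).length : Int) := by
  simp only [List.getD_eq_getElem?_getD, List.getElem?_map]
  cases h : desc[a]? <;> simp

theorem pvChildren_mem (anc : List Int) (n : Nat)
    (hin : ∀ j < n, 0 ≤ anc.getD j 0 ∧ anc.getD j 0 < (n : Int)) (v : Nat) :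
    ∀ u : Nat, u ∈ pvChildren anc n v ↔ (u < n ∧ pvPar anc u = v ∧ u ≠ v) := by
  intro u
  simp only [pvChildren, List.mem_filter, List.mem_range, Bool.and_eq_true, decide_eq_true_eq]
  constructor
  · rintro ⟨hu, h1, h2⟩
    refine ⟨hu, by simp only [pvPar, h1, Int.toNat_natCast], ?_⟩
    intro huv
    subst huv
    exact h2 h1
  · rintro ⟨hu, h1, h2⟩
    have ha := (hin u hu).1
    simp only [pvPar] at h1
    have he : anc.getD u 0 = (v : Int) := by
      rw [← Int.toNat_of_nonneg ha, h1]
    refine ⟨hu, he, ?_⟩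
    rw [he]
    intro hvu
    exact h2 (Nat.cast_injective hvu).symm

theorem pvChildren_nodup (anc : List Int) (m v : Nat) : (pvChildren anc m v).Nodup := by
  exact List.Nodup.filter _ (List.nodup_range)

-- characterization of A's validation loop on success
theorem loopA_ok_char (anc : List Int) (n : Nat) :
    ∀ (k i : Nat) (desc : List (List Int)) (root : Option Nat) (desc' : List (List Int)) (root' : Option Nat),
      k = n - i → i ≤ n → desc.length = n →
      (∀ a < n, desc.getD a [] = (pvChildren anc i a).map (fun j => ((j : Nat) : Int))) →
      pvRootInv anc i root →
      (∀ j < i, 0 ≤ anc.getD j 0 ∧ anc.getD j 0 < (n : Int)) →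
      costTreeLoopA anc n i desc root = .ok (desc', root') →
      ((∀ j < n, 0 ≤ anc.getD j 0 ∧ anc.getD j 0 < (n : Int)) ∧ desc'.length = n ∧
       (∀ a < n, desc'.getD a [] = (pvChildren anc n a).map (fun j => ((j : Nat) : Int))) ∧
       pvRootInv anc n root') := by
  intro k
  induction k with
  | zero =>
    intro i desc root desc' root' hk hi hlen hdc hri hin hres
    have hin' : ¬ i < n := by omega
    rw [costTreeLoopA.eq_def] at hres
    simp only [dif_neg hin'] at hres
    cases hres
    have hi' : i = n := by omega
    subst hi'
    exact ⟨hin, hlen, hdc, hri⟩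
  | succ k ih =>
    intro i desc root desc' root' hk hi hlen hdc hri hin hres
    by_cases hiN : i < n
    · rw [costTreeLoopA.eq_def] at hres
      simp only [dif_pos hiN] at hres
      set a := anc.getD i 0 with ha
      by_cases hrange : ¬ (0 ≤ a ∧ a < (n : Int))
      · rw [if_pos hrange] at hres; cases hres
      · rw [if_neg hrange] at hres
        push_neg at hrange
        by_cases hself : a = (i : Int)
        · rw [if_pos hself] at hres
          cases root with
          | some r0 => cases hres
          | none =>
            refine ih (i + 1) desc (some i) desc' root' (by omega) (by omega) hlen ?_ ?_ ?_ hres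
            · intro x hx
              rw [hdc x hx]
              have hch : pvChildren anc (i + 1) x = pvChildren anc i x := by
                simp only [pvChildren, List.range_succ, List.filter_append]
                have hpred : (decide (anc.getD i 0 = (x : Int)) && decide (anc.getD i 0 ≠ (i : Int))) = false := by
                  rw [← ha, hself]
                  simp
                have hnil : (List.filter (fun j => decide (anc.getD j 0 = (x : Int)) && decide (anc.getD j 0 ≠ (j : Int))) [i]) = [] := by
                  simp only [List.filter_cons, List.filter_nil, hpred, Bool.false_eq_true, if_false]
                rw [hnil, List.append_nil]
              rw [hch]
            · exact ⟨by omega, hself⟩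
            · intro j hj
              rcases Nat.lt_or_ge j i with hji | hji
              · exact hin j hji
              · have hje : j = i := by omega
                subst hje
                exact hrange
        · rw [if_neg hself] at hres
          have htn : a.toNat < n := by omega
          refine ih (i + 1) _ root desc' root' (by omega) (by omega) (by simpa using hlen) ?_ ?_ ?_ hres
          · intro x hx
            rw [pvGetD_set]
            by_cases hxa : a.toNat = x
            · subst hxa
              rw [if_pos ⟨rfl, by omega⟩]
              have hcx : pvChildren anc (i + 1) a.toNat = pvChildren anc i a.toNat ++ [i] := by
                simp only [pvChildren, List.range_succ, List.filter_append]
                congr 1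
                have hpred : (decide (anc.getD i 0 = ((a.toNat : Nat) : Int)) && decide (anc.getD i 0 ≠ (i : Int))) = true := by
                  simp only [Bool.and_eq_true, decide_eq_true_eq]
                  rw [← ha]
                  exact ⟨by rw [Int.toNat_of_nonneg hrange.1], hself⟩
                simp only [List.filter_cons, List.filter_nil, hpred, if_true]
              rw [hcx, hdc a.toNat htn]
              simp
            · rw [if_neg (by tauto)]
              rw [hdc x hx]
              have hch : pvChildren anc (i + 1) x = pvChildren anc i x := by
                simp only [pvChildren, List.range_succ, List.filter_append]
                have hne : ¬ anc.getD i 0 = (x : Int) := by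
                  rw [← ha]
                  intro hax
                  exact hxa (by rw [hax]; simp)
                have hpred : (decide (anc.getD i 0 = (x : Int)) && decide (anc.getD i 0 ≠ (i : Int))) = false := by
                  simp only [decide_eq_false hne, Bool.false_and]
                have hnil : (List.filter (fun j => decide (anc.getD j 0 = (x : Int)) && decide (anc.getD j 0 ≠ (j : Int))) [i]) = [] := by
                  simp only [List.filter_cons, List.filter_nil, hpred, Bool.false_eq_true, if_false]
                rw [hnil, List.append_nil]
              rw [hch]
          · cases root with
            | none =>
              intro j hj
              rcases Nat.lt_or_ge j i with hji | hji
              · exact hri j hji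
              · have hje : j = i := by omega
                subst hje
                exact fun hc => hself hc
            | some r0 => exact ⟨Nat.lt_succ_of_lt hri.1, hri.2⟩
          · intro j hj
            rcases Nat.lt_or_ge j i with hji | hji
            · exact hin j hji
            · have hje : j = i := by omega
              subst hje
              exact hrange
    · rw [costTreeLoopA.eq_def] at hres
      simp only [dif_neg hiN] at hres
      cases hres
      have hi' : i = n := by omega
      subst hi'
      exact ⟨hin, hlen, hdc, hri⟩

-- B's validation loop is A's with child lists abstracted to their lengths
theorem loopAB (anc : List Int) (n : Nat) :
    ∀ (k i : Nat) (desc : List (List Int)) (root : Option Nat), k = n - i →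
      costTreeLoopB anc n i (desc.map (fun l => (l.length : Int))) root =
        (costTreeLoopA anc n i desc root).map (fun p => (p.1.map (fun l => (l.length : Int)), p.2)) := by
  intro k
  induction k with
  | zero =>
    intro i desc root hk
    have hin' : ¬ i < n := by omega
    rw [costTreeLoopA.eq_def, costTreeLoopB.eq_def]
    simp [dif_neg hin', Except.map]
  | succ k ih =>
    intro i desc root hk
    by_cases hiN : i < n
    · rw [costTreeLoopA.eq_def, costTreeLoopB.eq_def]
      simp only [dif_pos hiN]
      set a := anc.getD i 0 with ha
      by_cases hrange : ¬ (0 ≤ a ∧ a < (n : Int))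
      · rw [if_pos hrange, if_pos hrange]
        rfl
      · rw [if_neg hrange, if_neg hrange]
        push_neg at hrange
        by_cases hself : a = (i : Int)
        · rw [if_pos hself, if_pos hself]
          cases root with
          | none => exact ih (i + 1) desc (some i) (by omega)
          | some r0 => simp [Except.map]
        · rw [if_neg hself, if_neg hself]
          have := ih (i + 1) (desc.set a.toNat ((desc.getD a.toNat []) ++ [(i : Int)])) root (by omega)
          rw [← this]
          congr 1
          rw [List.map_set]
          congr 1
          rw [pvGetD_map_len]
          simp
    · rw [costTreeLoopA.eq_def, costTreeLoopB.eq_def]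
      simp [dif_neg hiN, Except.map]

-- B's chain walk computes pvSteps
theorem chain_spec (anc : List Int) (n r : Nat)
    (hin : ∀ j < n, 0 ≤ anc.getD j 0 ∧ anc.getD j 0 < (n : Int)) :
    ∀ (m u d : Nat), m = n - d → u < n → d ≤ n →
      costTreeChain anc (r : Int) n (u : Int) d =
        (match pvSteps (pvPar anc) r m u with
         | some k => ((r : Int), d + k)
         | none => (((pvPar anc)^[m] u : Int), n)) := by
  intro m
  induction m with
  | zero =>
    intro u d hm hu hdn
    by_cases hur : u = r
    · subst hur
      rw [costTreeChain.eq_def]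
      simp [pvSteps]
    · rw [costTreeChain.eq_def]
      have hd : ¬ d < n := by omega
      rw [if_neg (by
        intro hc
        exact hd hc.2)]
      have hs : pvSteps (pvPar anc) r 0 u = none := by
        simp [pvSteps, hur]
      rw [hs]
      simp
      omega
  | succ m ih =>
    intro u d hm hu hdn
    by_cases hur : u = r
    · subst hur
      rw [costTreeChain.eq_def]
      simp [pvSteps]
    · have hd : d < n := by omega
      rw [costTreeChain.eq_def]
      rw [if_pos ⟨by exact_mod_cast hur, hd⟩]
      have ha := hin u hu
      have hcast : ((u : Int)).toNat = u := by simp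
      have hpu : anc.getD ((u : Int)).toNat 0 = ((pvPar anc u : Nat) : Int) := by
        rw [hcast, pvPar, Int.toNat_of_nonneg ha.1]
      rw [hpu]
      have hpun : pvPar anc u < n := by
        have : (anc.getD u 0).toNat < n := by omega
        exact this
      rw [ih (pvPar anc u) (d + 1) (by omega) hpun (by omega)]
      have hs : pvSteps (pvPar anc) r (m + 1) u =
          (pvSteps (pvPar anc) r m (pvPar anc u)).map (· + 1) := by
        simp [pvSteps, hur]
      rw [hs]
      cases hrec : pvSteps (pvPar anc) r m (pvPar anc u) with
      | some kk =>
        simp only [Option.map_some]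
        congr 1
        omega
      | none =>
        simp only [Option.map_none]
        rw [Function.iterate_succ_apply]

theorem foldl_set_getD (dsN : List Nat) (v : Nat) (hv : v ∉ dsN) :
    ∀ (L : List Int), (∀ c ∈ dsN, c < L.length) →
      ((dsN.foldl (fun lv u => lv.set u (lv.getD v 0 + 1)) L).length = L.length ∧
       ∀ u : Nat, (dsN.foldl (fun lv u => lv.set u (lv.getD v 0 + 1)) L).getD u 0 =
         if u ∈ dsN then L.getD v 0 + 1 else L.getD u 0) := by
  induction dsN with
  | nil => intro L _; simp
  | cons c rest ih =>
    have hv' : v ∉ rest := fun h => hv (List.mem_cons_of_mem c h)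
    have hvc : v ≠ c := fun h => hv (h ▸ List.mem_cons_self)
    intro L hlen
    have hcL : c < L.length := hlen c List.mem_cons_self
    simp only [List.foldl_cons]
    set L1 := L.set c (L.getD v 0 + 1) with hL1
    have hlen1 : ∀ x ∈ rest, x < L1.length := by
      intro x hx
      rw [hL1, List.length_set]
      exact hlen x (List.mem_cons_of_mem c hx)
    obtain ⟨ihl, ihg⟩ := ih hv' L1 hlen1
    have hL1v : L1.getD v 0 = L.getD v 0 := by
      rw [hL1, pvGetD_set, if_neg (by tauto)]
    constructor
    · rw [ihl, hL1, List.length_set]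
    · intro u
      rw [ihg u, hL1v]
      by_cases hur : u ∈ rest
      · simp [hur, List.mem_cons_of_mem c hur]
      · by_cases huc : u = c
        · subst huc
          simp only [hur, if_false, List.mem_cons, or_false]
          rw [hL1, pvGetD_set, if_pos ⟨rfl, hcL⟩]
          simp
        · have : u ∉ (c :: rest) := by
            simp [huc, hur]
          simp only [hur, if_false, this, if_false]
          rw [hL1, pvGetD_set, if_neg (by tauto)]

-- the invariant proof for A's stack traversal
theorem costTreeStack_cons (desc : List (List Int)) (f : Nat) (v : Int) (Q : List Int) (level : List Int) :
    costTreeStack desc (f + 1) (v :: Q) level =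
      costTreeStack desc f ((desc.getD v.toNat []).reverse ++ Q)
        ((desc.getD v.toNat []).foldl (fun lv u => lv.set u.toNat (lv.getD v.toNat 0 + 1)) level) := rfl

theorem stack_inv (anc : List Int) (desc : List (List Int)) (n r : Nat)
    (hin : ∀ j < n, 0 ≤ anc.getD j 0 ∧ anc.getD j 0 < (n : Int))
    (hrn : r < n) (hfix : anc.getD r 0 = (r : Int))
    (hds : ∀ v < n, desc.getD v [] = (pvChildren anc n v).map (fun j => ((j : Nat) : Int))) :
    ∀ (fuel : Nat) (QN : List Nat) (L : List Int),
      L.length = n →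
      (∀ v ∈ QN, v < n ∧ (pvSteps (pvPar anc) r n v).isSome) →
      QN.Pairwise (fun a b => a ≠ b ∧ pvSB (pvPar anc) r n a b = false ∧ pvSB (pvPar anc) r n b a = false) →
      (∀ u < n, (∃ v ∈ QN, pvSB (pvPar anc) r n v u = true) → L.getD u 0 = 0) →
      (∀ u < n, (¬ ∃ v ∈ QN, pvSB (pvPar anc) r n v u = true) →
        L.getD u 0 = (((pvSteps (pvPar anc) r n u).getD 0 : Nat) : Int)) →
      QN.length + ((Finset.range n).filter
        (fun u => ∃ v ∈ QN, pvSB (pvPar anc) r n v u = true)).card < fuel →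
      ∀ u < n, (costTreeStack desc fuel (QN.map (fun v => ((v : Nat) : Int))) L).getD u 0 =
        (((pvSteps (pvPar anc) r n u).getD 0 : Nat) : Int) := by
  have hcl : ∀ v < n, pvPar anc v < n := by
    intro v hv
    have := hin v hv
    simp only [pvPar]
    omega
  have hfix' : pvPar anc r = r := by
    simp only [pvPar]
    rw [hfix]
    simp
  intro fuel
  induction fuel with
  | zero =>
    intro QN L _ _ _ _ _ hm
    exact absurd hm (Nat.not_lt_zero _)
  | succ f ih =>
    intro QN L h1 h2 h3 h4 h5 hm u hu
    cases QN with
    | nil =>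
      simp only [List.map_nil]
      have hrfl : costTreeStack desc (f + 1) [] L = L := rfl
      rw [hrfl]
      exact h5 u hu (by simp)
    | cons v Q' =>
      obtain ⟨hvn, hvs⟩ := h2 v List.mem_cons_self
      obtain ⟨dv, hdv⟩ := Option.isSome_iff_exists.mp hvs
      have hmem := pvChildren_mem anc n hin v
      obtain ⟨hhead, htail⟩ := List.pairwise_cons.mp h3
      have hsc : ∀ c ∈ pvChildren anc n v, pvSteps (pvPar anc) r n c = some (dv + 1) := by
        intro c hc
        obtain ⟨hcn, hcp, hcv⟩ := (hmem c).mp hc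
        exact pvSteps_child (pvPar anc) r n hcl hfix' hcn hcp hcv hdv
      have hSBc : ∀ c ∈ pvChildren anc n v, pvSB (pvPar anc) r n v c = true := by
        intro c hc
        obtain ⟨hcn, hcp, hcv⟩ := (hmem c).mp hc
        exact pvSB_child (pvPar anc) r n hcl hfix' hcn hcp hcv hvs
      have hccF : ∀ a ∈ pvChildren anc n v, ∀ b ∈ pvChildren anc n v,
          pvSB (pvPar anc) r n a b = false := by
        intro a haa b hbb
        simp [pvSB, hsc a haa, hsc b hbb]
      have hcw : ∀ c ∈ pvChildren anc n v, ∀ w ∈ Q',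
          c ≠ w ∧ pvSB (pvPar anc) r n c w = false ∧ pvSB (pvPar anc) r n w c = false := by
        intro c hc w hw
        obtain ⟨hvw, hsbvw, hsbwv⟩ := hhead w hw
        refine ⟨?_, ?_, ?_⟩
        · intro hcwe
          rw [← hcwe] at hsbvw
          rw [hSBc c hc] at hsbvw
          cases hsbvw
        · refine Bool.eq_false_iff.mpr ?_
          intro htrue
          have hvwT := pvSB_trans (pvPar anc) r n (hSBc c hc) htrue
          rw [hvwT] at hsbvw
          cases hsbvw
        · refine Bool.eq_false_iff.mpr ?_
          intro htrue
          rcases pvSB_compare (pvPar anc) r n (hSBc c hc) htrue with he | hT | hT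
          · exact hvw he
          · rw [hT] at hsbvw; cases hsbvw
          · rw [hT] at hsbwv; cases hsbwv
      have hnotnew : ∀ x ∈ pvChildren anc n v,
          ¬ ∃ w ∈ (pvChildren anc n v).reverse ++ Q', pvSB (pvPar anc) r n w x = true := by
        rintro x hx ⟨w, hwmem, hsb⟩
        rcases List.mem_append.mp hwmem with hw | hw
        · rw [List.mem_reverse] at hw
          rw [hccF w hw x hx] at hsb
          cases hsb
        · rcases pvSB_compare (pvPar anc) r n (hSBc x hx) hsb with he | hT | hT
          · exact (hhead w hw).1 he
          · rw [(hhead w hw).2.1] at hT; cases hT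
          · rw [(hhead w hw).2.2] at hT; cases hT
      have hvnotin : v ∉ pvChildren anc n v := fun hvv => ((hmem v).mp hvv).2.2 rfl
      have hnodup : (pvChildren anc n v).Nodup := pvChildren_nodup anc n v
      obtain ⟨hlen', hget'⟩ := foldl_set_getD (pvChildren anc n v) v hvnotin L
        (by intro c hc; rw [h1]; exact ((hmem c).mp hc).1)
      have hnoabove : ¬ ∃ w ∈ v :: Q', pvSB (pvPar anc) r n w v = true := by
        rintro ⟨w, hwm, hsb⟩
        rcases List.mem_cons.mp hwm with he | hw
        · subst he; rw [pvSB_irrefl] at hsb; cases hsb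
        · rw [(hhead w hw).2.2] at hsb; cases hsb
      have hLv : L.getD v 0 = ((dv : Nat) : Int) := by
        have := h5 v hvn hnoabove
        rw [hdv] at this
        exact this
      -- rewrite the goal into the shape of the induction hypothesis
      rw [List.map_cons, costTreeStack_cons]
      simp only [Int.toNat_natCast]
      rw [hds v hvn, List.foldl_map, ← List.map_reverse, ← List.map_append]
      simp only [Int.toNat_natCast]
      -- apply the induction hypothesis
      refine ih ((pvChildren anc n v).reverse ++ Q')
        ((pvChildren anc n v).foldl (fun lv c => lv.set c (lv.getD v 0 + 1)) L)
        (by rw [hlen', h1]) ?_ ?_ ?_ ?_ ?_ u hu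
      · -- members in range and reachable
        intro w hw
        rcases List.mem_append.mp hw with hw | hw
        · rw [List.mem_reverse] at hw
          exact ⟨((hmem w).mp hw).1, by rw [hsc w hw]; rfl⟩
        · exact h2 w (List.mem_cons_of_mem v hw)
      · -- pairwise incomparability
        refine List.pairwise_append.mpr ⟨?_, htail, ?_⟩
        · rw [List.pairwise_reverse]
          have hpne : (pvChildren anc n v).Pairwise (fun a b => a ≠ b) := hnodup
          refine hpne.imp_of_mem ?_
          intro a b haa hbb hne
          exact ⟨hne.symm, hccF b hbb a haa, hccF a haa b hbb⟩
        · intro c hc w hw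
          rw [List.mem_reverse] at hc
          exact hcw c hc w hw
      · -- zeros below the new stack
        intro x hxn hex
        by_cases hxd : x ∈ pvChildren anc n v
        · exact absurd hex (hnotnew x hxd)
        · rw [hget' x, if_neg hxd]
          obtain ⟨w, hwm, hsb⟩ := hex
          rcases List.mem_append.mp hwm with hw | hw
          · rw [List.mem_reverse] at hw
            exact h4 x hxn ⟨v, List.mem_cons_self, pvSB_trans (pvPar anc) r n (hSBc w hw) hsb⟩
          · exact h4 x hxn ⟨w, List.mem_cons_of_mem v hw, hsb⟩
      · -- correct levels away from the new stack
        intro x hxn hnex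
        by_cases hxd : x ∈ pvChildren anc n v
        · rw [hget' x, if_pos hxd, hLv, hsc x hxd]
          simp only [Option.getD_some]
          push_cast
          ring
        · rw [hget' x, if_neg hxd]
          refine h5 x hxn ?_
          rintro ⟨w, hwm, hsb⟩
          rcases List.mem_cons.mp hwm with he | hw
          · rw [he] at hsb
            obtain ⟨c, hcn, hcp, hcv, hcu⟩ := pvSB_decompose (pvPar anc) r n hcl hfix' hxn hsb
            have hcd : c ∈ pvChildren anc n v := (hmem c).mpr ⟨hcn, hcp, hcv⟩
            rcases hcu with he | hT
            · exact hxd (he ▸ hcd)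
            · exact hnex ⟨c, List.mem_append.mpr (Or.inl (List.mem_reverse.mpr hcd)), hT⟩
          · exact hnex ⟨w, List.mem_append.mpr (Or.inr hw), hsb⟩
      · -- the measure decreases
        have hsetid : (Finset.range n).filter
              (fun x => ∃ w ∈ v :: Q', pvSB (pvPar anc) r n w x = true) =
            (pvChildren anc n v).toFinset ∪ (Finset.range n).filter
              (fun x => ∃ w ∈ (pvChildren anc n v).reverse ++ Q', pvSB (pvPar anc) r n w x = true) := by
          ext x
          simp only [Finset.mem_filter, Finset.mem_union, Finset.mem_range, List.mem_toFinset]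
          constructor
          · rintro ⟨hxn, w, hwm, hsb⟩
            rcases List.mem_cons.mp hwm with he | hw
            · rw [he] at hsb
              obtain ⟨c, hcn, hcp, hcv, hcu⟩ := pvSB_decompose (pvPar anc) r n hcl hfix' hxn hsb
              have hcd : c ∈ pvChildren anc n v := (hmem c).mpr ⟨hcn, hcp, hcv⟩
              rcases hcu with he | hT
              · exact Or.inl (he ▸ hcd)
              · exact Or.inr ⟨hxn, c, List.mem_append.mpr (Or.inl (List.mem_reverse.mpr hcd)), hT⟩
            · exact Or.inr ⟨hxn, w, List.mem_append.mpr (Or.inr hw), hsb⟩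
          · rintro (hxd | ⟨hxn, w, hwm, hsb⟩)
            · exact ⟨((hmem x).mp hxd).1, v, List.mem_cons_self, hSBc x hxd⟩
            · rcases List.mem_append.mp hwm with hw | hw
              · rw [List.mem_reverse] at hw
                exact ⟨hxn, v, List.mem_cons_self, pvSB_trans (pvPar anc) r n (hSBc w hw) hsb⟩
              · exact ⟨hxn, w, List.mem_cons_of_mem v hw, hsb⟩
        have hdisj : Disjoint (pvChildren anc n v).toFinset ((Finset.range n).filter
            (fun x => ∃ w ∈ (pvChildren anc n v).reverse ++ Q', pvSB (pvPar anc) r n w x = true)) := by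
          rw [Finset.disjoint_left]
          intro x hx hx2
          rw [List.mem_toFinset] at hx
          rw [Finset.mem_filter] at hx2
          exact hnotnew x hx hx2.2
        have hcardid := Finset.card_union_of_disjoint hdisj
        rw [hsetid, hcardid, List.toFinset_card_of_nodup hnodup] at hm
        simp only [List.length_append, List.length_reverse, List.length_cons] at hm ⊢
        omega

theorem foldl_cond_sum (g : Nat → Int) (c : Nat → Prop) [DecidablePred c] :
    ∀ (l : List Nat) (init : Int),
      l.foldl (fun t v => if c v then t + g v else t) init =
        init + (l.map (fun v => if c v then g v else 0)).sum := by
  intro l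
  induction l with
  | nil => intro init; simp
  | cons x xs ih =>
    intro init
    simp only [List.foldl_cons, List.map_cons, List.sum_cons, ih]
    by_cases hc : c x <;> simp [hc] <;> ring

theorem cost_tree_main : ∀ (anc : List Int) (freq : List Int), cost_tree anc freq = cost_tree_alt anc freq := by
  intro anc freq
  have hAB := loopAB anc anc.length anc.length 0 (List.replicate anc.length []) none (by omega)
  have hrep : (List.replicate anc.length ([] : List Int)).map (fun l => ((l.length : Nat) : Int)) =
      List.replicate anc.length (0 : Int) := by simp
  rw [hrep] at hAB
  simp only [cost_tree, cost_tree_alt]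
  rw [hAB]
  cases hres : costTreeLoopA anc anc.length 0 (List.replicate anc.length []) none with
  | error e => simp [Except.map]
  | ok p =>
    obtain ⟨desc, root⟩ := p
    simp only [Except.map]
    cases root with
    | none => rfl
    | some r =>
      dsimp only
      obtain ⟨hin, hlen, hdesc, hroot⟩ := loopA_ok_char anc anc.length anc.length 0
        (List.replicate anc.length []) none desc (some r) (by omega) (by omega) (by simp)
        (by
          intro a ha
          simp [pvChildren, List.getD_eq_getElem?_getD, List.getElem?_replicate, ha])
        (by intro j hj; exact absurd hj (Nat.not_lt_zero j))
        (by intro j hj; exact absurd hj (Nat.not_lt_zero j))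
        hres
      obtain ⟨hrn, hfix⟩ := hroot
      by_cases hmax : 2 < ((desc.map (fun l => (l.length : Int))).max?.getD 0)
      · rw [if_pos hmax, if_pos hmax]
      · rw [if_neg hmax, if_neg hmax]
        -- the level array computed by A's stack loop
        have hL0 : ∀ u : Nat, ((List.replicate anc.length (0 : Int)).set r 0).getD u 0 = 0 := by
          intro u
          rw [pvGetD_set]
          split_ifs with h
          · rfl
          · simp only [List.getD_eq_getElem?_getD, List.getElem?_replicate]
            split_ifs <;> rfl
        have hlev : ∀ u < anc.length,
            (costTreeStack desc (anc.length + 1) [((r : Nat) : Int)]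
              ((List.replicate anc.length (0 : Int)).set r 0)).getD u 0 =
            (((pvSteps (pvPar anc) r anc.length u).getD 0 : Nat) : Int) := by
          have := stack_inv anc desc anc.length r hin hrn hfix hdesc (anc.length + 1) [r]
            ((List.replicate anc.length (0 : Int)).set r 0)
            (by rw [List.length_set, List.length_replicate])
            (by
              intro v hv
              rw [List.mem_singleton] at hv
              subst hv
              exact ⟨hrn, by rw [pvSteps_self]; rfl⟩)
            (List.pairwise_singleton _ _)
            (by intro u _ _; exact hL0 u)
            (by
              intro u hu hne
              rw [hL0 u]
              cases hst : pvSteps (pvPar anc) r anc.length u with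
              | none => rfl
              | some du =>
                rcases Nat.eq_zero_or_pos du with h0 | h0
                · subst h0
                  rfl
                · exfalso
                  apply hne
                  refine ⟨r, List.mem_singleton_self r, ?_⟩
                  have hit := ((pvSteps_char (pvPar anc) r anc.length u du).mp hst).2.1
                  simp only [pvSB, hst, pvSteps_self]
                  simp [Nat.sub_zero, hit, h0])
            (by
              have hsub : (Finset.range anc.length).filter
                    (fun u => ∃ v ∈ [r], pvSB (pvPar anc) r anc.length v u = true) ⊆
                  (Finset.range anc.length).erase r := by
                intro x hx
                rw [Finset.mem_filter] at hx
                obtain ⟨hxr, v, hv, hsb⟩ := hx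
                rw [List.mem_singleton] at hv
                subst hv
                rw [Finset.mem_erase]
                refine ⟨?_, hxr⟩
                intro hxe
                subst hxe
                rw [pvSB_irrefl] at hsb
                cases hsb
              have hcard := Finset.card_le_card hsub
              rw [Finset.card_erase_of_mem (Finset.mem_range.mpr hrn), Finset.card_range] at hcard
              simp only [List.length_singleton]
              omega)
          intro u hu
          have h2 := this u hu
          rw [List.map_cons, List.map_nil] at h2
          exact h2
        -- B's fold as a sum
        rw [foldl_cond_sum
          (fun v => freq.getD v 0 * (((costTreeChain anc ((r : Nat) : Int) anc.length ((v : Nat) : Int) 0).2 : Nat) : Int))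
          (fun v => (costTreeChain anc ((r : Nat) : Int) anc.length ((v : Nat) : Int) 0).1 = ((r : Nat) : Int))
          (List.range anc.length) 0, zero_add]
        congr 1
        apply List.map_congr_left
        intro v hv
        rw [List.mem_range] at hv
        rw [hlev v hv]
        have hch := chain_spec anc anc.length r hin anc.length v 0 (by omega) hv (by omega)
        cases hst : pvSteps (pvPar anc) r anc.length v with
        | some k =>
          rw [hst] at hch
          simp only at hch
          rw [hch]
          simp
        | none =>
          rw [hst] at hch
          simp only at hch
          rw [hch]
          have hnr : (pvPar anc)^[anc.length] v ≠ r :=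
            ((pvSteps_none (pvPar anc) r anc.length v).mp hst) anc.length (Nat.le_refl _)
          have hcond : ¬ ((((pvPar anc)^[anc.length] v : Nat) : Int) = ((r : Nat) : Int)) := by
            intro hc
            exact hnr (Nat.cast_injective hc)
          rw [if_neg hcond]
          simp

-- ===== VERDICT (by name: the statement is the Claim_ definition above) =====
theorem cost_tree_spec : Claim_equal_cost_tree := by
  intro anc freq _ _
  unfold Spec_cost_tree
  exact cost_tree_main anc freq
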